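-- pv_equiv track=rewrite | github.com/leeminHong1990/PaoDeKuai | kbengine/assets/scripts/common/utility.py | makeKeyCardTripleBring
-- ===== SOURCE A (Python) =====
-- import copy
--
-- def getCard2NumDict(cards):
--     card2NumDict = {}
--     for t in cards:
--         if t not in card2NumDict:
--             card2NumDict[t] = 1
--         else:
--             card2NumDict[t] += 1
--     return card2NumDict
--
-- def makeKeyCardTripleBring(originCardsButKey, originKeys):  # 癞子转化为新的三带二或三带一
--     makeCards = copy.deepcopy(originCardsButKey)
--     shiftCards = rightShiftCards(originCardsButKey)
--     shiftCards = sorted(shiftCards)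
--     keyCardNum = len(originKeys)
--     if keyCardNum != 0:
--         keyCard = originKeys[0]
--
--     suggestList = []
--     card2NumDict = getCard2NumDict(shiftCards)
--     keyList = card2NumDict.keys()
--     keyList = sorted(keyList)
--     for i in range(len(keyList)):
--         tempList = []
--         needNum = 3 - card2NumDict[keyList[i]]
--         if needNum == keyCardNum:
--             for j in range(keyCardNum):
--                 tempList.append(keyList[i] << 3)
--             suggestList = tempList
--         if needNum < keyCardNum:
--             for j in range(needNum):
--                 tempList.append(keyList[i] << 3)
--             for j in range(keyCardNum - needNum):
--                 tempList.append(keyCard)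
--             suggestList = tempList
--
--     makeCards.extend(suggestList)
--     makeCards = sorted(makeCards)
--     return makeCards
--
-- def rightShiftCards(cards):
--     result = [0] * len(cards)
--     for i in range(len(cards)):
--         result[i] = cards[i] >> 3
--     return result
-- ===== SOURCE B (Python) =====
-- def makeKeyCardTripleBring(originCardsButKey, originKeys):
--     k = len(originKeys)
--     key1 = originKeys[:1]
--     rest = sorted((c >> 3 for c in originCardsButKey), reverse=True)
--     suggest = []
--     while rest:
--         v = rest[0]
--         run = 1
--         while run < len(rest) and rest[run] == v:
--             run += 1
--         need = 3 - run
--         if need <= k: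
--             suggest = [v << 3] * need + key1 * (k - need)
--             break
--         rest = rest[run:]
--     return sorted(originCardsButKey + suggest)
-- ===== Notes on version B (the rewrite author's own statement) =====
-- stated objective: alternative
-- what changed: A counts values in a dict and loops over all sorted distinct keys overwriting suggestList; B uses no dict: it sorts the shifted values in descending order and scans runs of equal values, breaking at the first (hence largest) run whose deficit 3-runlength fits the number of wildcards, building the suggestion by list repetition.
-- crash fix: When originKeys is empty and some shifted value occurs more than 3 times, A raises UnboundLocalError (keyCard unbound); B returns sorted(originCardsButKey). — e.g. on makeKeyCardTripleBring([3, 2, 1, 0], []): A raises UnboundLocalError, B returns [0, 1, 2, 3]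
import Mathlib
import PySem

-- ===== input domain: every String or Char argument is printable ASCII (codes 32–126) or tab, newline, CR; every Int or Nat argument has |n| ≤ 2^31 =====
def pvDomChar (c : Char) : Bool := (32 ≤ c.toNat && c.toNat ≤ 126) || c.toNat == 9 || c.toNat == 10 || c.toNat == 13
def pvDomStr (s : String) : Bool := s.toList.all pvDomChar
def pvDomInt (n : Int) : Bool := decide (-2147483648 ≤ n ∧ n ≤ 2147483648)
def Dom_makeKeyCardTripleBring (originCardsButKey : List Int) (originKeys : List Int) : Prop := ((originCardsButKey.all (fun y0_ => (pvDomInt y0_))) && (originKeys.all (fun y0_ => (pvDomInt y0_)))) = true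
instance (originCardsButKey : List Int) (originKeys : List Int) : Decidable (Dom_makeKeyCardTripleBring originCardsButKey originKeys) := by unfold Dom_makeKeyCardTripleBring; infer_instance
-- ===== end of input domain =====

-- B drops A's count-dict plus loop over all sorted distinct keys: it sorts shifted values
-- descending and scans runs, breaking at the first qualifying run (objective: alternative).


-- ===== PORT A =====
-- result[i] = cards[i] >> 3 for every i (the filling loop realised as the map it computes element-wise)
def rightShiftCards (cards : List Int) : List Int :=
  cards.map (fun c : Int => c >>> (3 : Nat))

def getCard2NumDict (cards : List Int) : PySem.Dict Int Int :=
  cards.foldl (fun d t => if d.contains t = false then d.insert t 1 else d.insert t (d.getD t 0 + 1)) PySem.Dict.empty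

def makeKeyCardTripleBring (originCardsButKey : List Int) (originKeys : List Int) : List Int :=
  let makeCards := originCardsButKey
  let shiftCards := rightShiftCards originCardsButKey
  let shiftCards := PySem.List.sorted shiftCards (fun x => x) false
  let keyCardNum : Int := (originKeys.length : Int)
  -- Python assigns keyCard only when keyCardNum ≠ 0; when keyCardNum = 0 it is unbound and the
  -- branch that reads it raises UnboundLocalError — exactly the inputs Pre_ excludes.
  let keyCard : Int := originKeys.headD 0
  let card2NumDict := getCard2NumDict shiftCards
  let keyList := PySem.List.sorted card2NumDict.keys (fun x => x) false
  let suggestList : List Int := keyList.foldl (fun suggestList kk =>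
      let needNum := 3 - card2NumDict.getD kk 0
      let tempList : List Int := []
      let suggestList := if needNum = keyCardNum
        then tempList ++ List.replicate keyCardNum.toNat (kk <<< (3 : Nat))
        else suggestList
      let suggestList := if needNum < keyCardNum
        then (tempList ++ List.replicate needNum.toNat (kk <<< (3 : Nat)))
              ++ List.replicate (keyCardNum - needNum).toNat keyCard
        else suggestList
      suggestList) []
  PySem.List.sorted (makeCards ++ suggestList) (fun x => x) false

-- ===== PORT B =====
-- the while loop over the descending sorted list: count the leading run, stop at the first
-- run whose deficit fits, else continue on the remainder (rest = rest[run:])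
def pickSuggest (rest : List Int) (k : Int) (key1 : List Int) : List Int :=
  match rest with
  | [] => []
  | v :: t =>
    let run : Int := 1 + ((t.takeWhile (fun x => x == v)).length : Int)
    let need := 3 - run
    if need ≤ k then
      List.replicate need.toNat (v <<< (3 : Nat)) ++ (List.replicate (k - need).toNat key1).flatten
    else pickSuggest (t.dropWhile (fun x => x == v)) k key1
termination_by rest.length
decreasing_by
  simp only [List.length_cons]
  have := List.length_dropWhile_le (fun x => x == v) t
  omega

def makeKeyCardTripleBring_alt (originCardsButKey : List Int) (originKeys : List Int) : List Int :=
  let k : Int := (originKeys.length : Int)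
  let key1 := originKeys.take 1
  let rest := PySem.List.sorted (originCardsButKey.map (fun c : Int => c >>> (3 : Nat))) (fun x => x) true
  let suggest := pickSuggest rest k key1
  PySem.List.sorted (originCardsButKey ++ suggest) (fun x => x) false

-- ===== PRECONDITION & SPEC =====
-- Pre_ excludes exactly the inputs where A raises UnboundLocalError: originKeys empty while some
-- shifted card value occurs more than three times (the branch reading the unassigned keyCard fires).
def Pre_makeKeyCardTripleBring (originCardsButKey : List Int) (originKeys : List Int) : Prop :=
  originKeys ≠ [] ∨ ∀ c ∈ originCardsButKey,
    (originCardsButKey.map (fun x : Int => x >>> (3 : Nat))).count (c >>> (3 : Nat)) ≤ 3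
instance (originCardsButKey : List Int) (originKeys : List Int) : Decidable (Pre_makeKeyCardTripleBring originCardsButKey originKeys) := by unfold Pre_makeKeyCardTripleBring; infer_instance

def pvWitness_makeKeyCardTripleBring : List Int × List Int := ([17, 17, 9, 3], [40])

-- A raises UnboundLocalError on these inputs; B returns the sorted original cards.
def Raises_makeKeyCardTripleBring (originCardsButKey : List Int) (originKeys : List Int) : Prop :=
  originKeys = [] ∧ ∃ c ∈ originCardsButKey,
    3 < (originCardsButKey.map (fun x : Int => x >>> (3 : Nat))).count (c >>> (3 : Nat))
instance (originCardsButKey : List Int) (originKeys : List Int) : Decidable (Raises_makeKeyCardTripleBring originCardsButKey originKeys) := by unfold Raises_makeKeyCardTripleBring; infer_instance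
def pvRaiseWitness_makeKeyCardTripleBring : List Int × List Int := ([3, 2, 1, 0], [])
def pvRaiseWitnessOut_makeKeyCardTripleBring : List Int := [0, 1, 2, 3]

def Spec_makeKeyCardTripleBring (originCardsButKey : List Int) (originKeys : List Int) (out : List Int) : Prop := out = makeKeyCardTripleBring_alt originCardsButKey originKeys
instance (originCardsButKey : List Int) (originKeys : List Int) (out : List Int) : Decidable (Spec_makeKeyCardTripleBring originCardsButKey originKeys out) := by unfold Spec_makeKeyCardTripleBring; infer_instance

-- ===== CLAIM (what is proved, stated in full; the proofs are below) =====
def Claim_equal_makeKeyCardTripleBring : Prop := ∀ (originCardsButKey : List Int) (originKeys : List Int), Dom_makeKeyCardTripleBring originCardsButKey originKeys → Pre_makeKeyCardTripleBring originCardsButKey originKeys → Spec_makeKeyCardTripleBring originCardsButKey originKeys (makeKeyCardTripleBring originCardsButKey originKeys)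
def Claim_raises_makeKeyCardTripleBring : Prop := (∀ (originCardsButKey : List Int) (originKeys : List Int), Dom_makeKeyCardTripleBring originCardsButKey originKeys → Raises_makeKeyCardTripleBring originCardsButKey originKeys → ¬ Pre_makeKeyCardTripleBring originCardsButKey originKeys) ∧ (Dom_makeKeyCardTripleBring (pvRaiseWitness_makeKeyCardTripleBring.1) (pvRaiseWitness_makeKeyCardTripleBring.2) ∧ Raises_makeKeyCardTripleBring (pvRaiseWitness_makeKeyCardTripleBring.1) (pvRaiseWitness_makeKeyCardTripleBring.2) ∧ makeKeyCardTripleBring_alt (pvRaiseWitness_makeKeyCardTripleBring.1) (pvRaiseWitness_makeKeyCardTripleBring.2) = pvRaiseWitnessOut_makeKeyCardTripleBring)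

-- ===== LEMMAS AND PROOFS =====
-- generic: an overwrite-on-condition fold keeps the LAST qualifying element's value
lemma foldl_overwrite {α β : Type} (p : α → Bool) (g : α → β) (l : List α) (init : β) :
    l.foldl (fun s x => if p x then g x else s) init
      = (match (l.filter p).getLast? with | none => init | some v => g v) := by
  induction l generalizing init with
  | nil => simp
  | cons a t ih =>
    by_cases h : p a
    · simp only [List.foldl_cons, h, if_pos, List.filter_cons_of_pos h]
      rw [ih]
      rcases hf : t.filter p with _ | ⟨b, u⟩
      · simp
      · rcases List.getLast?_isSome.mpr (by simp : (b :: u) ≠ []) |> Option.isSome_iff_exists.mp with ⟨m, hm⟩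
        simp [hm]
    · simp only [List.foldl_cons, h, if_neg, List.filter_cons_of_neg, Bool.not_eq_true]
      rw [ih]

lemma mem_le_getLast {l : List Int} {m : Int} (hp : l.Pairwise (· < ·))
    (hl : l.getLast? = some m) : ∀ x ∈ l, x ≤ m := by
  induction l with
  | nil => simp at hl
  | cons a t ih =>
    rcases t with _ | ⟨b, u⟩
    · simp at hl; simp [hl]
    · rw [List.getLast?_cons_cons] at hl
      have hp' := hp.of_cons
      intro x hx
      rcases List.mem_cons.mp hx with rfl | hx
      · have hm : m ∈ b :: u := List.mem_of_getLast? hl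
        exact le_of_lt (List.rel_of_pairwise_cons hp hm)
      · exact ih hp' hl x hx

-- on a descending list, find? returns a maximal qualifying element
lemma find?_desc_max {l2 : List Int} {Q : Int → Bool} {v : Int}
    (hp : l2.Pairwise (fun a b => b ≤ a)) (h : l2.find? Q = some v) :
    ∀ x ∈ l2, Q x = true → x ≤ v := by
  induction l2 with
  | nil => simp at h
  | cons a t ih =>
    by_cases ha : Q a
    · rw [List.find?_cons_of_pos ha] at h
      injection h with h; subst h
      intro x hx _
      rcases List.mem_cons.mp hx with rfl | hx
      · exact le_refl x
      · exact List.rel_of_pairwise_cons hp hx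
    · rw [List.find?_cons_of_neg (by simpa using ha)] at h
      intro x hx hQ
      rcases List.mem_cons.mp hx with rfl | hx
      · exact absurd hQ ha
      · exact ih hp.of_cons h x hx hQ

-- the last qualifier of a strictly ascending list = the first qualifier of a descending list
-- with the same members (both are the maximal qualifying value)
lemma select_eq2 {β : Type} {l l2 : List Int} (hp : l.Pairwise (· < ·))
    (hp2 : l2.Pairwise (fun a b => b ≤ a))
    (hmem : ∀ x, x ∈ l ↔ x ∈ l2) (Q : Int → Bool) (i : β) (g g2 : Int → β)
    (hg : ∀ x ∈ l, Q x = true → g x = g2 x) :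
    (match (l.filter Q).getLast? with | none => i | some v => g v)
      = (match l2.find? Q with | none => i | some v => g2 v) := by
  rcases hf : l2.find? Q with _ | v
  · have hnone : ∀ x ∈ l, ¬ Q x = true := fun x hx => by
      simpa using List.find?_eq_none.mp hf x ((hmem x).mp hx)
    have hnil : l.filter Q = [] := List.filter_eq_nil_iff.mpr hnone
    simp [hnil]
  · have hQv : Q v = true := List.find?_some hf
    have hvl : v ∈ l := (hmem v).mpr (List.mem_of_find?_eq_some hf)
    have hmax : ∀ x ∈ l2, Q x = true → x ≤ v := find?_desc_max hp2 hf
    have hvf : v ∈ l.filter Q := List.mem_filter.mpr ⟨hvl, hQv⟩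
    rcases hl : (l.filter Q).getLast? with _ | m
    · rw [List.getLast?_eq_none_iff] at hl; rw [hl] at hvf; simp at hvf
    · have hmf : m ∈ l.filter Q := List.mem_of_getLast? hl
      have hQm := (List.mem_filter.mp hmf).2
      have hml := (List.mem_filter.mp hmf).1
      have h1 : v ≤ m := mem_le_getLast (List.Pairwise.filter _ hp) hl v hvf
      have h2 : m ≤ v := hmax m ((hmem m).mp hml) hQm
      have hmv : m = v := le_antisymm h2 h1
      subst hmv
      simpa using hg m hml hQm

lemma getCard2NumDict_eq_counter' (l : List Int) :
    l.foldl (fun d t => if d.contains t = false then d.insert t 1 else d.insert t (d.getD t 0 + 1)) PySem.Dict.empty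
      = PySem.Dict.counter l := by
  have h : (fun (d : PySem.Dict Int Int) t => if d.contains t = false then d.insert t 1 else d.insert t (d.getD t 0 + 1))
      = fun d t => d.insert t (d.getD t 0 + 1) := by
    funext d t
    by_cases h : d.contains t
    · simp [h]
    · simp only [Bool.not_eq_true] at h
      rw [PySem.Dict.getD_of_not_contains _ _ h]; simp [h]
  rw [h, PySem.Dict.foldl_insert_getD_add_one_eq_counter]

lemma foldA (cnt : Int → Int) (k kc : Int) (L : List Int) :
    L.foldl (fun s kk =>
        if 3 - cnt kk < k then
          [] ++ List.replicate (3 - cnt kk).toNat (kk <<< (3:Nat))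
            ++ List.replicate (k - (3 - cnt kk)).toNat kc
        else if 3 - cnt kk = k then [] ++ List.replicate k.toNat (kk <<< (3:Nat)) else s) []
      = (match (L.filter (fun kk => decide (3 - cnt kk ≤ k))).getLast? with
         | none => ([] : List Int)
         | some v =>
           if 3 - cnt v < k then
             List.replicate (3 - cnt v).toNat (v <<< (3:Nat))
               ++ List.replicate (k - (3 - cnt v)).toNat kc
           else List.replicate k.toNat (v <<< (3:Nat))) := by
  have hfun : (fun (s : List Int) (kk : Int) =>
        if 3 - cnt kk < k then
          [] ++ List.replicate (3 - cnt kk).toNat (kk <<< (3:Nat))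
            ++ List.replicate (k - (3 - cnt kk)).toNat kc
        else if 3 - cnt kk = k then [] ++ List.replicate k.toNat (kk <<< (3:Nat)) else s)
      = fun s kk => if decide (3 - cnt kk ≤ k) = true then
          (if 3 - cnt kk < k then
             List.replicate (3 - cnt kk).toNat (kk <<< (3:Nat))
               ++ List.replicate (k - (3 - cnt kk)).toNat kc
           else List.replicate k.toNat (kk <<< (3:Nat))) else s := by
    funext s kk
    by_cases h1 : 3 - cnt kk < k
    · simp [h1, le_of_lt h1]
    · by_cases h2 : 3 - cnt kk = k
      · simp [h2]
      · have h3 : ¬ (3 - cnt kk ≤ k) := by omega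
        simp [h1, h2, h3]
  rw [hfun, foldl_overwrite]
  rcases (List.filter (fun kk => decide (3 - cnt kk ≤ k)) L).getLast? with _ | v <;> simp

-- pickSuggest on a descending list = the first (maximal) qualifying value, with the run
-- length replaced by the value's count in the whole list
lemma pick_spec (k : Int) (key1 : List Int) (cnt : Int → Int) :
    ∀ (n : Nat) (rest : List Int), rest.length ≤ n →
      rest.Pairwise (fun a b => b ≤ a) →
      (∀ x ∈ rest, (rest.count x : Int) = cnt x) →
      pickSuggest rest k key1 =
        match rest.find? (fun v => decide (3 - cnt v ≤ k)) with
        | none => []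
        | some v => List.replicate (3 - cnt v).toNat (v <<< (3:Nat))
            ++ (List.replicate (k - (3 - cnt v)).toNat key1).flatten := by
  intro n
  induction n with
  | zero =>
    intro rest hlen _ _
    have : rest = [] := List.eq_nil_of_length_eq_zero (Nat.le_zero.mp hlen)
    subst this
    simp [pickSuggest]
  | succ n ih =>
    intro rest hlen hp hcnt
    match rest with
    | [] => simp [pickSuggest]
    | v :: t =>
      have htd := List.takeWhile_append_dropWhile (p := fun x => x == v) (l := t)
      set tw := t.takeWhile (fun x => x == v) with htw
      set d := t.dropWhile (fun x => x == v) with hd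
      have htw_all : ∀ x ∈ tw, x = v := by
        intro x hx
        have := List.mem_takeWhile_imp hx
        simpa using this
      have hd_sub : d.Sublist t := List.dropWhile_sublist _
      have hp_t : t.Pairwise (fun a b => b ≤ a) := hp.of_cons
      have hp_d : d.Pairwise (fun a b => b ≤ a) := hp_t.sublist hd_sub
      have hle_t : ∀ x ∈ t, x ≤ v := fun x hx => List.rel_of_pairwise_cons hp hx
      -- every element of d differs from v
      have hd_ne : ∀ x ∈ d, x ≠ v := by
        rcases hw : d with _ | ⟨w, d'⟩
        · intro x hx; simp at hx
        · have hwv : ¬ (w == v) = true := by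
            have := List.head?_dropWhile_not (p := fun x => x == v) (l := t)
            rw [← hd, hw] at this; simpa using this
          have hwv' : w ≠ v := by simpa using hwv
          intro x hx
          rcases List.mem_cons.mp hx with rfl | hx'
          · exact hwv'
          · intro hxe; subst hxe
            have hp_w : (w :: d').Pairwise (fun a b => b ≤ a) := hw ▸ hp_d
            have h1 : x ≤ w := List.rel_of_pairwise_cons hp_w hx'
            have h2 : w ≤ x := hle_t w (hd_sub.mem (hw ▸ List.mem_cons_self))
            exact hwv' (le_antisymm h2 h1)
      have hcount_tw : tw.count v = tw.length :=
        List.count_eq_length.mpr (fun b hb => ((htw_all b hb).symm : v = b))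
      have hcount_d0 : d.count v = 0 :=
        List.count_eq_zero.mpr (fun hx => hd_ne v hx rfl)
      have hrun : (v :: t).count v = 1 + tw.length := by
        have : t.count v = tw.count v + d.count v := by
          conv_lhs => rw [← htd]
          exact List.count_append ..
        rw [List.count_cons_self, this, hcount_tw, hcount_d0]
        omega
      have hcv : cnt v = 1 + (tw.length : Int) := by
        rw [← hcnt v List.mem_cons_self, hrun]; push_cast; ring
      rw [pickSuggest]
      by_cases hq : 3 - (1 + (tw.length : Int)) ≤ k
      · rw [if_pos hq]
        have hQv : (fun v => decide (3 - cnt v ≤ k)) v = true := by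
          simp only [decide_eq_true_eq, hcv]; exact hq
        rw [List.find?_cons_of_pos (p := fun v => decide (3 - cnt v ≤ k)) hQv]
        simp [← htw, hcv]
      · rw [if_neg hq]
        have hQv : ¬ (fun v => decide (3 - cnt v ≤ k)) v = true := by
          simp only [decide_eq_true_eq, hcv]; exact hq
        rw [List.find?_cons_of_neg (p := fun v => decide (3 - cnt v ≤ k)) hQv]
        -- find? skips the whole leading run (all = v, all failing Q)
        have hfind : t.find? (fun v => decide (3 - cnt v ≤ k))
            = d.find? (fun v => decide (3 - cnt v ≤ k)) := by
          conv_lhs => rw [← htd]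
          rw [List.find?_append]
          have : tw.find? (fun v => decide (3 - cnt v ≤ k)) = none := by
            apply List.find?_eq_none.mpr
            intro x hx
            rw [htw_all x hx]
            simpa using hQv
          simp only [this, Option.none_or]
        rw [hfind]
        -- counts of surviving values are unchanged
        have hcnt_d : ∀ x ∈ d, (d.count x : Int) = cnt x := by
          intro x hx
          have hxv : x ≠ v := hd_ne x hx
          have hxt : ((v :: t).count x) = d.count x := by
            rw [List.count_cons_of_ne hxv.symm]
            conv_lhs => rw [← htd]
            rw [List.count_append]
            have : tw.count x = 0 := List.count_eq_zero.mpr (fun hm => hxv (htw_all x hm))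
            omega
          rw [← hcnt x (List.mem_cons_of_mem v (hd_sub.mem hx)), hxt]
        have hlen_d : d.length ≤ n := by
          have h1 : d.length ≤ t.length := hd_sub.length_le
          simp only [List.length_cons] at hlen
          omega
        exact ih d hlen_d hp_d hcnt_d

lemma ports_eq (cards keys : List Int)
    (hpre : Pre_makeKeyCardTripleBring cards keys) :
    makeKeyCardTripleBring cards keys = makeKeyCardTripleBring_alt cards keys := by
  simp only [makeKeyCardTripleBring, makeKeyCardTripleBring_alt, rightShiftCards,
    getCard2NumDict, getCard2NumDict_eq_counter']
  have hperm : (PySem.List.sorted (cards.map (fun c : Int => c >>> (3:Nat))) (fun x => x) false).Perm (cards.map (fun c : Int => c >>> (3:Nat))) := PySem.List.sorted_perm _ _ _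
  have hpermR : (PySem.List.sorted (cards.map (fun c : Int => c >>> (3:Nat))) (fun x => x) true).Perm (cards.map (fun c : Int => c >>> (3:Nat))) := PySem.List.sorted_perm _ _ _
  have hcnt : ∀ v : Int, (PySem.Dict.counter (PySem.List.sorted (cards.map (fun c : Int => c >>> (3:Nat))) (fun x => x) false)).getD v 0 = ((cards.map (fun c : Int => c >>> (3:Nat))).count v : Int) := by
    intro v
    rw [PySem.Dict.getD_counter]
    exact_mod_cast congrArg Nat.cast (hperm.count_eq v)
  simp only [hcnt, PySem.Dict.keys_counter]
  rw [foldA]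
  rw [pick_spec ((keys.length : Int)) (keys.take 1)
        (fun v => ((cards.map (fun c : Int => c >>> (3:Nat))).count v : Int))
        (PySem.List.sorted (cards.map (fun c : Int => c >>> (3:Nat))) (fun x => x) true).length
        _ le_rfl (PySem.List.sorted_pairwise_rev _ _)
        (fun x _ => by exact_mod_cast congrArg Nat.cast (hpermR.count_eq x))]
  congr 1
  refine congrArg (fun t => cards ++ t) ?_
  refine select_eq2 ?_ (PySem.List.sorted_pairwise_rev _ _) ?_ _ [] _ _ ?_
  · exact PySem.List.sorted_ofList_pairwise_lt _
  · intro x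
    simp only [PySem.List.mem_sorted, PySem.Set.mem_ofList, hperm.mem_iff, hpermR.mem_iff]
  · intro x hx hQ
    rw [decide_eq_true_eq] at hQ
    rcases keys with _ | ⟨c, rest⟩
    · -- k = 0; Pre_ gives count ≤ 3, so the deficit is exactly 0 and both sides are []
      have hxsh : x ∈ cards.map (fun c : Int => c >>> (3:Nat)) := by
        have h1' := (PySem.List.mem_sorted _ _ _ _).mp hx
        rw [PySem.Set.mem_ofList] at h1'
        exact hperm.mem_iff.mp h1'
      obtain ⟨a, ha, rfl⟩ := List.mem_map.mp hxsh
      have hc3 : (cards.map (fun c : Int => c >>> (3:Nat))).count (a >>> (3:Nat)) ≤ 3 := by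
        rcases hpre with h | h
        · exact absurd rfl h
        · exact h a ha
      simp only [List.length_nil, Nat.cast_zero] at hQ ⊢
      have h0 : (3 : Int) - ↑(List.count (a >>> (3:Nat)) (cards.map (fun c : Int => c >>> (3:Nat)))) = 0 := by omega
      simp [h0]
    · by_cases hlt : 3 - (↑(List.count x (cards.map (fun c : Int => c >>> (3:Nat)))) : Int) < ↑(c :: rest).length
      · rw [if_pos hlt]
        simp [List.flatten_replicate_singleton]
      · have heq : 3 - (↑(List.count x (cards.map (fun c : Int => c >>> (3:Nat)))) : Int) = ↑(c :: rest).length := by omega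
        rw [if_neg hlt, ← heq]
        simp

-- ===== VERDICT (by name: the statement is the Claim_ definition above) =====
theorem makeKeyCardTripleBring_spec : Claim_equal_makeKeyCardTripleBring := by
  intro cards keys _ hpre
  exact ports_eq cards keys hpre

theorem makeKeyCardTripleBring_raises : Claim_raises_makeKeyCardTripleBring := by
  unfold Claim_raises_makeKeyCardTripleBring
  refine ⟨?_, by decide, by decide, ?_⟩
  · rintro cards keys _ ⟨hk, c, hc, hgt⟩ hpre
    rcases hpre with h | h
    · exact h hk
    · exact absurd (h c hc) (by omega)
  · have h1 : PySem.List.sorted (([3, 2, 1, 0] : List Int).map (fun c : Int => c >>> (3 : Nat))) (fun x => x) true = [0, 0, 0, 0] := by decide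
    show makeKeyCardTripleBring_alt [3, 2, 1, 0] [] = [0, 1, 2, 3]
    simp only [makeKeyCardTripleBring_alt, h1]
    rw [pickSuggest]
    decide

-- self-check: the raise witness really lies outside Pre_ (derived from the raises theorem)
theorem pvRaiseWitnessExcluded_ok :
    ¬ Pre_makeKeyCardTripleBring pvRaiseWitness_makeKeyCardTripleBring.1 pvRaiseWitness_makeKeyCardTripleBring.2 := by
  have h := makeKeyCardTripleBring_raises
  unfold Claim_raises_makeKeyCardTripleBring at h
  exact h.1 _ _ h.2.1 h.2.2.1
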